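-- pv_equiv track=rewrite | github.com/Jangchaeyun/BOJStundy | 브론즈1/py/1126/24389.py | two_complete
-- ===== SOURCE A (Python) =====
-- def plus_one(bin_num):
--     temp = 1
--     result = []
--
--     for bi_idx, bi in enumerate(bin_num[::-1]):
--         plus_result = int(bi) + temp
--
--         if plus_result > 1:
--             result.append(str(0))
--         else:
--             result.append(str(1))
--             temp = 0
--
--         if temp == 0:
--             break
--
--     return bin_num[:32-bi_idx-1] + result[::-1]
--
-- def two_complete(N):
--     answer = 0
--     binary = list(bin(N)[2:].zfill(32))
--
--     reverse_binary = [str(abs(int(bi) - 1)) for bi in binary]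
--
--     complement = plus_one(bin_num=reverse_binary)
--
--     for bi, co in zip(binary, complement):
--         if bi != co:
--             answer += 1
--
--     return answer
-- ===== SOURCE B (Python) =====
-- def two_complete(N):
--     # N and its 32-bit two's complement agree on every bit from the lowest set
--     # '1' downwards and differ on every bit above it, so the number of differing
--     # bits is exactly the 0-based position (from the left) of the last '1' in the
--     # 32-bit string; 0 when there is no '1' (N == 0).
--     bits = bin(N)[2:].zfill(32)
--     i = bits.rfind('1')
--     return i if i != -1 else 0
-- ===== Notes on version B (the rewrite author's own statement) =====
-- stated objective: simpler
-- what changed: Replaces the flip-bits/plus_one carry loop and the zip mismatch count by a single rfind of the last '1' in the 32-bit string: the bits above the lowest set bit are exactly the ones that differ from the two's complement, so the answer is that bit's index from the left (0 for N==0).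
import Mathlib
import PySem

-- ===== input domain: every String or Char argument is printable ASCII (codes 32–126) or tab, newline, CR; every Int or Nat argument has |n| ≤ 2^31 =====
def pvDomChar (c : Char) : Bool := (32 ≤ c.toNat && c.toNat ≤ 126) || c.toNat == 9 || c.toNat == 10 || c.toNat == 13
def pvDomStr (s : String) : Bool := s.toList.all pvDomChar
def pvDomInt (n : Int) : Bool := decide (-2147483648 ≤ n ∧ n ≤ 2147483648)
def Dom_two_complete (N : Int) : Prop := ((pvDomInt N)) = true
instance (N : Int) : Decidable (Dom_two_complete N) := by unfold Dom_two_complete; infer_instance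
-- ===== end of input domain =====

-- B replaces the flip/carry-loop/zip-count pipeline by locating the last '1' of the
-- 32-bit string (its index from the left is the number of differing bits); objective: simpler.

-- ===== PORT A =====
-- Python 1-char strings (the elements of `binary`, `reverse_binary`, `result`) are List Char.
-- the `for … enumerate … break` loop of plus_one; returns (bi_idx after the loop, result).
-- On [] Python would leave bi_idx unbound (NameError); unreachable here: bin_num always has 32 elements.
def pvPlusOneLoop (l : List (List Char)) (biIdx : Nat) (temp : Int)
    (result : List (List Char)) : Nat × List (List Char) :=
  match l with
  | [] => (biIdx - 1, result)
  | bi :: rest =>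
    let plus_result := (PySem.Int.ofChars? bi).getD 0 + temp   -- int(bi); never none on inputs admitted by Pre_
    let (result, temp) :=
      if plus_result > 1 then (result ++ [PySem.Int.toChars 0], temp)
      else (result ++ [PySem.Int.toChars 1], (0 : Int))
    if temp = 0 then (biIdx, result) else pvPlusOneLoop rest (biIdx + 1) temp result

def pvPlusOne (bin_num : List (List Char)) : List (List Char) :=
  let p := pvPlusOneLoop ((PySem.List.slice? bin_num none none (-1)).getD []) 0 1 []   -- bin_num[::-1]
  PySem.List.slice bin_num none (some (32 - (p.1 : Int) - 1)) ++
    (PySem.List.slice? p.2 none none (-1)).getD []                                      -- result[::-1]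

def two_complete (N : Int) : Int :=
  let binary : List (List Char) :=
    (PySem.Chars.zfill (PySem.List.slice (PySem.Int.toBinChars0b N) (some 2) none) 32).map (fun c => [c])
  let reverse_binary : List (List Char) :=
    binary.map (fun bi => PySem.Int.toChars ((((PySem.Int.ofChars? bi).getD 0) - 1).natAbs : Int))
  let complement := pvPlusOne reverse_binary
  (binary.zip complement).foldl (fun answer p => if p.1 ≠ p.2 then answer + 1 else answer) 0

-- ===== PORT B =====
-- hand port of str.rfind with a single-char needle (PySem has no rfind): index of the
-- last occurrence of '1', -1 if absent; exact for that call.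
def pvRfindOne : List Char → Int
  | [] => -1
  | c :: rest =>
    let r := pvRfindOne rest
    if r ≠ -1 then r + 1 else if c = '1' then 0 else -1

def two_complete_alt (N : Int) : Int :=
  let bits := PySem.Chars.zfill (PySem.List.slice (PySem.Int.toBinChars0b N) (some 2) none) 32
  let i := pvRfindOne bits
  if i ≠ -1 then i else 0

-- ===== PRECONDITION & SPEC =====
-- Pre_ excludes N < 0, where A raises ValueError (bin(N)[2:] then starts with 'b', which int() rejects).
def Pre_two_complete (N : Int) : Prop := 0 ≤ N
instance (N : Int) : Decidable (Pre_two_complete N) := by unfold Pre_two_complete; infer_instance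
def pvWitness_two_complete : Int := (5)

def Spec_two_complete (N : Int) (out : Int) : Prop := out = two_complete_alt N
instance (N : Int) (out : Int) : Decidable (Spec_two_complete N out) := by unfold Spec_two_complete; infer_instance

-- ===== CLAIM (what is proved, stated in full; the proofs are below) =====
def Claim_equal_two_complete : Prop := ∀ (N : Int), Dom_two_complete N → Pre_two_complete N → Spec_two_complete N (two_complete N)

-- ===== LEMMAS AND PROOFS =====

-- every digit Nat.toDigits 2 emits is '0' or '1'
lemma pv_toDigitsCore_mem (f : Nat) : ∀ (n : Nat) (l : List Char),
    (∀ c ∈ l, c = '0' ∨ c = '1') → ∀ c ∈ Nat.toDigitsCore 2 f n l, c = '0' ∨ c = '1' := by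
  induction f with
  | zero => intro n l hl; simpa [Nat.toDigitsCore] using hl
  | succ f ih =>
    intro n l hl c hc
    have hd : Nat.digitChar (n % 2) = '0' ∨ Nat.digitChar (n % 2) = '1' := by
      have : n % 2 = 0 ∨ n % 2 = 1 := Nat.mod_two_eq_zero_or_one n
      rcases this with h | h <;> simp [h, Nat.digitChar]
    have hl' : ∀ x ∈ Nat.digitChar (n % 2) :: l, x = '0' ∨ x = '1' := by
      intro x hx
      rcases List.mem_cons.mp hx with rfl | hx
      · exact hd
      · exact hl x hx
    simp only [Nat.toDigitsCore] at hc
    split at hc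
    · exact hl' c hc
    · exact ih _ _ hl' c hc

lemma pv_toDigits_mem (n : Nat) : ∀ c ∈ Nat.toDigits 2 n, c = '0' ∨ c = '1' :=
  pv_toDigitsCore_mem _ n [] (by simp)

-- zfill on a sign-free string is plain left padding
lemma pv_zfill_eq (cs : List Char) (h32 : cs.length ≤ 32)
    (hsgn : ∀ c ∈ cs, c = '0' ∨ c = '1') :
    PySem.Chars.zfill cs 32 = List.replicate (32 - cs.length) '0' ++ cs := by
  unfold PySem.Chars.zfill
  rcases Nat.lt_or_ge cs.length 32 with h | h
  · simp only [show ¬((32 : Int) ≤ cs.length) by exact_mod_cast not_le.mpr h, if_false]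
    cases cs with
    | nil => simp
    | cons c rest =>
      have := hsgn c (by simp)
      have hne : ¬(c = '+' ∨ c = '-') := by rcases this with h | h <;> simp [h]
      simp [hne]
  · have heq : cs.length = 32 := le_antisymm h32 h
    simp [heq]

-- rfind helpers
lemma pv_rfindOne_replicate (m : Nat) : pvRfindOne (List.replicate m '0') = -1 := by
  induction m with
  | zero => rfl
  | succ m ih => simp [List.replicate_succ, pvRfindOne, ih]

lemma pv_rfindOne_decomp (xs : List Char) (m : Nat) :
    pvRfindOne (xs ++ '1' :: List.replicate m '0') = xs.length := by
  induction xs with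
  | nil => simp [pvRfindOne, pv_rfindOne_replicate]
  | cons c xs ih =>
    have hne : (xs.length : Int) ≠ -1 := by omega
    simp [pvRfindOne, ih, hne]

lemma pv_ofChars_zero : PySem.Int.ofChars? ['0'] = some 0 := by decide
lemma pv_ofChars_one : PySem.Int.ofChars? ['1'] = some 1 := by decide
lemma pv_toChars_zero : PySem.Int.toChars 0 = ['0'] := by decide
lemma pv_toChars_one : PySem.Int.toChars 1 = ['1'] := by decide

-- the carry loop: scans '1's (original trailing zeros) emitting '0', stops at the first '0' emitting '1'
lemma pv_plusOneLoop_run (m : Nat) : ∀ (rest : List (List Char)) (idx : Nat) (acc : List (List Char)),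
    pvPlusOneLoop (List.replicate m ['1'] ++ ['0'] :: rest) idx 1 acc =
      (idx + m, acc ++ List.replicate m ['0'] ++ [['1']]) := by
  induction m with
  | zero =>
    intro rest idx acc
    simp [pvPlusOneLoop, pv_ofChars_zero, pv_toChars_one]
  | succ m ih =>
    intro rest idx acc
    rw [List.replicate_succ, List.cons_append, pvPlusOneLoop]
    simp only [pv_ofChars_one, pv_toChars_zero, Option.getD_some]
    norm_num
    rw [ih rest (idx + 1) (acc ++ [['0']])]
    refine Prod.ext ?_ ?_
    · show idx + 1 + m = idx + (m + 1); omega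
    · simp [List.replicate_succ]

-- the carry loop when every bit carries (N = 0): exhausts the list
lemma pv_plusOneLoop_all (m : Nat) : ∀ (idx : Nat) (acc : List (List Char)),
    pvPlusOneLoop (List.replicate m ['1']) idx 1 acc =
      (idx + m - 1, acc ++ List.replicate m ['0']) := by
  induction m with
  | zero => intro idx acc; simp [pvPlusOneLoop]
  | succ m ih =>
    intro idx acc
    rw [List.replicate_succ, pvPlusOneLoop]
    simp only [pv_ofChars_one, pv_toChars_zero, Option.getD_some]
    norm_num
    rw [ih (idx + 1) (acc ++ [['0']])]
    refine Prod.ext ?_ ?_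
    · show idx + 1 + m - 1 = idx + (m + 1) - 1; omega
    · simp [List.replicate_succ]

-- decomposition of a 0/1 string by its last '1'
lemma pv_decomp (bs : List Char) (h01 : ∀ c ∈ bs, c = '0' ∨ c = '1') :
    bs = List.replicate bs.length '0' ∨
      ∃ pre m, bs = pre ++ '1' :: List.replicate m '0' ∧ ∀ c ∈ pre, c = '0' ∨ c = '1' := by
  induction bs using List.reverseRecOn with
  | nil => left; simp
  | append_singleton xs c ih =>
    have hxs : ∀ d ∈ xs, d = '0' ∨ d = '1' := fun d hd => h01 d (by simp [hd])
    rcases h01 c (by simp) with rfl | rfl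
    · rcases ih hxs with h | ⟨pre, m, heq, hp⟩
      · left
        rw [List.length_append, List.length_singleton, List.replicate_succ']
        rw [h]
        simp
      · right
        exact ⟨pre, m + 1, by rw [heq]; simp [List.replicate_succ'], hp⟩
    · right
      exact ⟨xs, 0, by simp, hxs⟩

-- the element-wise reverse_binary map as a function of the underlying char
lemma pv_g_eq (c : Char) (h : c = '0' ∨ c = '1') :
    PySem.Int.toChars (((((PySem.Int.ofChars? [c]).getD 0) - 1).natAbs : Int)) =
      (if c = '0' then ['1'] else ['0']) := by
  rcases h with rfl | rfl <;> decide

-- the main combinatorial fact, over an arbitrary 32-char bit string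
lemma pv_core (bs : List Char) (hlen : bs.length = 32)
    (h01 : ∀ c ∈ bs, c = '0' ∨ c = '1') :
    ((bs.map (fun c => ([c] : List Char))).zip
        (pvPlusOne ((bs.map (fun c => ([c] : List Char))).map
          (fun bi => PySem.Int.toChars ((((PySem.Int.ofChars? bi).getD 0) - 1).natAbs : Int))))).foldl
      (fun answer p => if p.1 ≠ p.2 then answer + 1 else answer) 0 =
    (if pvRfindOne bs ≠ -1 then pvRfindOne bs else 0) := by
  have hmap : (bs.map (fun c => ([c] : List Char))).map
      (fun bi => PySem.Int.toChars ((((PySem.Int.ofChars? bi).getD 0) - 1).natAbs : Int)) =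
      bs.map (fun c => if c = '0' then ['1'] else ['0']) := by
    rw [List.map_map]
    exact List.map_congr_left (fun c hc => pv_g_eq c (h01 c hc))
  rcases pv_decomp bs h01 with h | ⟨pre, m, heq, hp⟩
  · -- N = 0: all 32 bits are '0'; the carry loop exhausts and the complement equals binary
    rw [hlen] at h
    subst h
    rw [hmap]
    simp only [List.map_replicate]
    simp only [if_true]
    rw [pv_rfindOne_replicate]
    simp only [ne_eq, not_true_eq_false, if_false]
    unfold pvPlusOne
    rw [PySem.List.slice?_none_none_neg_one, Option.getD_some, List.reverse_replicate,
      pv_plusOneLoop_all 32 0 []]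
    simp only [List.nil_append]
    rw [PySem.List.slice_to _ (by norm_num : (0:Int) ≤ 32 - ((31:Nat) : Int) - 1)]
    have h0 : ((32 : Int) - ((31:Nat) : Int) - 1).toNat = 0 := by norm_num
    rw [h0, List.take_zero]
    rw [PySem.List.slice?_none_none_neg_one, Option.getD_some, List.reverse_replicate,
      List.nil_append, List.zip_replicate']
    rw [PySem.List.foldl_ite_add_one (fun p : List Char × List Char => p.1 ≠ p.2)]
    rw [List.countP_eq_zero.mpr (by intro a ha; simp_all [List.eq_of_mem_replicate ha])]
    simp
  · -- N > 0: bs = pre ++ '1' :: 0…0; the loop stops at the lowest set bit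
    have hplen : pre.length = 31 - m ∧ m ≤ 31 := by
      subst heq; simp [List.length_append] at hlen; omega
    subst heq
    rw [pv_rfindOne_decomp]
    simp only [ne_eq, show ((pre.length : Int) ≠ -1) by omega, not_false_eq_true, if_true]
    rw [hmap]
    simp only [List.map_append, List.map_cons, List.map_replicate]
    simp only [if_true]
    rw [show (if ('1':Char) = '0' then (['1']:List Char) else ['0']) = ['0'] from by decide]
    unfold pvPlusOne
    rw [PySem.List.slice?_none_none_neg_one, Option.getD_some]
    rw [List.reverse_append, List.reverse_cons, List.reverse_replicate, List.append_assoc]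
    simp only [List.singleton_append]
    rw [pv_plusOneLoop_run m _ 0 []]
    rw [PySem.List.slice?_none_none_neg_one, Option.getD_some, List.nil_append]
    have hb : ((32 : Int) - ((0 + m : Nat) : Int) - 1).toNat = pre.length := by omega
    rw [PySem.List.slice_to _ (by omega : (0:Int) ≤ 32 - ((0 + m : Nat) : Int) - 1), hb]
    rw [List.take_left' (by simp [hplen.1])]
    rw [List.reverse_append, List.reverse_replicate, List.reverse_singleton,
      List.singleton_append]
    rw [List.zip_append (by simp), List.zip_cons_cons, List.zip_replicate']
    rw [PySem.List.foldl_ite_add_one (fun p : List Char × List Char => p.1 ≠ p.2)]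
    rw [List.countP_append, List.countP_cons]
    rw [List.zip_map', List.countP_map]
    rw [List.countP_eq_length.mpr ?_, List.countP_eq_zero.mpr ?_]
    · simp
    · intro a ha
      have h := List.eq_of_mem_replicate ha
      subst h
      decide
    · intro a ha
      rcases hp a ha with rfl | rfl <;> decide

theorem pv_main (N : Int) (hN0 : 0 ≤ N) (hNle : N ≤ 2147483648) :
    two_complete N = two_complete_alt N := by
  have hds := pv_toDigits_mem N.toNat
  have hlen : (Nat.toDigits 2 N.toNat).length ≤ 32 :=
    Nat.toDigits_length 2 N.toNat 32 (by norm_num) (by omega)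
  have h0b : PySem.Int.toBinChars0b N = '0' :: 'b' :: Nat.toDigits 2 N.toNat := by
    simp [PySem.Int.toBinChars0b, not_lt.mpr hN0]
  have hslice : PySem.List.slice (PySem.Int.toBinChars0b N) (some 2) none =
      Nat.toDigits 2 N.toNat := by
    rw [h0b, PySem.List.slice_from _ (by norm_num)]
    rfl
  have hz := pv_zfill_eq (Nat.toDigits 2 N.toNat) hlen hds
  have hblen : (PySem.Chars.zfill (Nat.toDigits 2 N.toNat) 32).length = 32 := by
    rw [PySem.Chars.length_zfill]; omega
  have hb01 : ∀ c ∈ PySem.Chars.zfill (Nat.toDigits 2 N.toNat) 32, c = '0' ∨ c = '1' := by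
    rw [hz]
    intro c hc
    rcases List.mem_append.mp hc with hc | hc
    · left; exact List.eq_of_mem_replicate hc
    · exact hds c hc
  unfold two_complete two_complete_alt
  rw [hslice]
  exact pv_core _ hblen hb01

-- ===== VERDICT (by name: the statement is the Claim_ definition above) =====
theorem two_complete_spec : Claim_equal_two_complete := by
  intro N hDom hPre
  have h : -2147483648 ≤ N ∧ N ≤ 2147483648 := by
    have := of_decide_eq_true hDom
    exact this
  exact (pv_main N hPre h.2).symm ▸ rfl
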